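-- pv_equiv track=rewrite | github.com/1713661/algorithm | Python39/2021-08-09_프로그래머스_42860_조이스틱_문제조건이명확하지않은듯다른문제부터풀자.py | nextIdx
-- ===== SOURCE A (Python) =====
-- def nextIdx(idx,check): # 좀 더 효율적인 코드 없을까...
--
--     tmpL,tmpR = idx,idx
--     cntL,cntR = 0,0
--
--     def moveLeft(temp):
--         return temp-1 if temp>0 else len(check)-1
--
--     def moveRight(temp):
--         return temp+1 if temp<len(check)-1 else 0
--
--     for _ in range(len(check)): ## while True:하면 안돼 생각을 해 생각을
--         cntL += 1
--         tmpL = moveLeft(tmpL)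
--         if not check[tmpL]:
--             break
--
--     for _ in range(len(check)):
--         cntR += 1
--         tmpR = moveRight(tmpR)
--         if not check[tmpR]:
--             break
--
--     if cntL==len(check) or cntR==len(check):
--         return -1,-1
--
--     elif cntL>=cntR:
--         idx = tmpR
--         return idx,cntR
--
--     else:
--         idx = tmpL
--         return idx,cntL
-- ===== SOURCE B (Python) =====
-- def nextIdx(idx, check):
--     n = len(check)
--     for d in range(1, n):
--         r = (idx + d) % n
--         if not check[r]:
--             return r, d
--         l = (idx - d) % n
--         if not check[l]:
--             return l, d
--     return -1, -1
-- ===== Notes on version B (the rewrite author's own statement) =====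
-- stated objective: simpler
-- what changed: Replaced A's two separate wrap-around walks (left and right, each with its own move helper and counter, followed by a comparison of the two counters) by one outward pass over distances d = 1..n-1 testing (idx+d)%n before (idx-d)%n, so the first hit is the answer and no counters or comparison remain; Pre_ restricts idx to a real index of check (plus the inputs whose answer is forced), because on other out-of-range idx A raises IndexError or returns accidental values produced by Python's negative indexing masking the invalid start position.
-- outside the precondition, e.g. on nextIdx(-2, [True, True, False]): A returns (-1, 1), B returns (2, 1); on nextIdx(-1, [False, True]): A returns (-1, -1), B returns (0, 1)
import Mathlib
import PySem

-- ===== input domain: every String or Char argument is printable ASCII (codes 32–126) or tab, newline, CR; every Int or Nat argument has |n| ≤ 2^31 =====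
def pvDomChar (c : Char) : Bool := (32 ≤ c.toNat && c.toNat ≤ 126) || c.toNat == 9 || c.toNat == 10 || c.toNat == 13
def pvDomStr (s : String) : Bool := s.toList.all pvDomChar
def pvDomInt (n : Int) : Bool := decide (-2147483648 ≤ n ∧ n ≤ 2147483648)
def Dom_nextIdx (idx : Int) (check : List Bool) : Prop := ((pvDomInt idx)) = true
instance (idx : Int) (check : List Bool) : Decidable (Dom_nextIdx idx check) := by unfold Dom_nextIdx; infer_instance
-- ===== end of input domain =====

-- B replaces A's two separate wrap-around directional scans (each with its own move helper and
-- counter, compared afterwards) by a single outward pass over distances 1..n-1, right before left: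
-- simpler, same O(n) cost.


-- check[i] as the loops read it: `true` (= keep scanning) when the index is out of range
-- (Python would raise there; Pre_ keeps every scanned index in range, so this default is never used inside Pre_)
def pvGetB (check : List Bool) (i : Int) : Bool := (PySem.List.pyGet? check i).getD true

-- ===== PORT A =====
def pvMoveLeft (n temp : Int) : Int := if temp > 0 then temp - 1 else n - 1

def pvMoveRight (n temp : Int) : Int := if temp < n - 1 then temp + 1 else 0

-- A's two identical for-loops (fuel = len(check), counter, break on an unchecked cell)
def pvLoopA (check : List Bool) (move : Int → Int) : Nat → Int → Int → Int × Int
  | 0, tmp, cnt => (tmp, cnt)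
  | f + 1, tmp, cnt =>
      let cnt' := cnt + 1
      let tmp' := move tmp
      if pvGetB check tmp' = false then (tmp', cnt')
      else pvLoopA check move f tmp' cnt'

def nextIdx (idx : Int) (check : List Bool) : Int × Int :=
  let n : Int := (check.length : Int)
  let L := pvLoopA check (pvMoveLeft n) check.length idx 0
  let R := pvLoopA check (pvMoveRight n) check.length idx 0
  if L.2 = n ∨ R.2 = n then (-1, -1)
  else if L.2 ≥ R.2 then (R.1, R.2)
  else (L.1, L.2)

-- ===== PORT B =====
def pvLoopB (check : List Bool) (idx n : Int) : List Int → Int × Int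
  | [] => (-1, -1)
  | d :: ds =>
      let r := PySem.Int.mod (idx + d) n
      if pvGetB check r = false then (r, d)
      else
        let l := PySem.Int.mod (idx - d) n
        if pvGetB check l = false then (l, d)
        else pvLoopB check idx n ds

def nextIdx_alt (idx : Int) (check : List Bool) : Int × Int :=
  pvLoopB check idx (check.length : Int) (PySem.List.pyRange 1 (check.length : Int) 1)

-- ===== PRECONDITION & SPEC =====
-- Pre_ excludes out-of-range idx (idx < 0 or idx ≥ len(check)) for lists of length ≥ 2 that
-- contain an unchecked cell: there A either raises IndexError (idx > len or idx < -len-1) or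
-- returns accidental values because Python's negative indexing masks the invalid start position
-- (it can even return the meaningless index -1 with a positive count). Pre_ keeps every input
-- where idx is a real index, and the out-of-range inputs whose answer is forced ((-1, -1)).
def Pre_nextIdx (idx : Int) (check : List Bool) : Prop :=
  check = [] ∨ (0 ≤ idx ∧ idx < (check.length : Int)) ∨
    (-(check.length : Int) - 1 ≤ idx ∧ idx ≤ (check.length : Int) ∧
      (check.length = 1 ∨ false ∉ check))
instance (idx : Int) (check : List Bool) : Decidable (Pre_nextIdx idx check) := by
  unfold Pre_nextIdx; infer_instance

def pvWitness_nextIdx : Int × List Bool := (1, [true, false, true])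

def Spec_nextIdx (idx : Int) (check : List Bool) (out : Int × Int) : Prop := out = nextIdx_alt idx check
instance (idx : Int) (check : List Bool) (out : Int × Int) : Decidable (Spec_nextIdx idx check out) := by unfold Spec_nextIdx; infer_instance

-- ===== CLAIM (what is proved, stated in full; the proofs are below) =====
def Claim_equal_nextIdx : Prop := ∀ (idx : Int) (check : List Bool), Dom_nextIdx idx check → Pre_nextIdx idx check → Spec_nextIdx idx check (nextIdx idx check)

-- ===== LEMMAS AND PROOFS =====

-- the cell A's scan in direction `s` (+1 = right, -1 = left) inspects at distance d from idx
def pvChk (check : List Bool) (idx s : Int) (d : Nat) : Bool :=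
  pvGetB check ((idx + s * (d : Int)) % (check.length : Int))

lemma pos_step (check : List Bool) (idx s : Int) (k : Nat)
    (move : Int → Int)
    (hmove : ∀ t, 0 ≤ t → t < (check.length : Int) → move t = (t + s) % (check.length : Int))
    (hn : 0 < (check.length : Int)) :
    move ((idx + s * (k : Int)) % (check.length : Int))
      = (idx + s * ((k : Int) + 1)) % (check.length : Int) := by
  rw [hmove _ (Int.emod_nonneg _ (by omega)) (Int.emod_lt_of_pos _ hn)]
  rw [Int.emod_add_emod]
  ring_nf

lemma loopA_hit (check : List Bool) (move : Int → Int) (s idx : Int)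
    (hmove : ∀ t, 0 ≤ t → t < (check.length : Int) → move t = (t + s) % (check.length : Int))
    (hn : 0 < (check.length : Int)) :
    ∀ (f k m : Nat) (c : Int), k < m → m ≤ k + f →
      (∀ d, k < d → d < m → pvChk check idx s d = true) →
      pvChk check idx s m = false →
      pvLoopA check move f ((idx + s * (k : Int)) % (check.length : Int)) c
        = ((idx + s * (m : Int)) % (check.length : Int), c + ((m : Int) - (k : Int))) := by
  intro f
  induction f with
  | zero => intro k m c h1 h2 _ _; omega
  | succ f ih =>
      intro k m c h1 h2 hall hm
      simp only [pvLoopA]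
      rw [pos_step check idx s k move hmove hn]
      have e1 : idx + s * ((k : Int) + 1) = idx + s * (((k + 1 : Nat)) : Int) := by push_cast; ring
      rw [e1]
      rw [show pvGetB check ((idx + s * (((k + 1 : Nat)) : Int)) % (check.length : Int))
            = pvChk check idx s (k + 1) from rfl]
      by_cases hkm : m = k + 1
      · subst hkm
        rw [hm, if_pos rfl]
        simp only [Prod.mk.injEq]
        exact ⟨trivial, by push_cast; ring⟩
      · have ht : pvChk check idx s (k + 1) = true := hall (k + 1) (by omega) (by omega)
        rw [ht, if_neg (by simp)]
        rw [ih (k + 1) m (c + 1) (by omega) (by omega) (fun d hd1 hd2 => hall d (by omega) hd2) hm]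
        simp only [Prod.mk.injEq]
        exact ⟨trivial, by push_cast; ring⟩

lemma loopA_all (check : List Bool) (move : Int → Int) (s idx : Int)
    (hmove : ∀ t, 0 ≤ t → t < (check.length : Int) → move t = (t + s) % (check.length : Int))
    (hn : 0 < (check.length : Int)) :
    ∀ (f k : Nat) (c : Int),
      (∀ d, k < d → d ≤ k + f → pvChk check idx s d = true) →
      pvLoopA check move f ((idx + s * (k : Int)) % (check.length : Int)) c
        = ((idx + s * ((k : Int) + (f : Int))) % (check.length : Int), c + (f : Int)) := by
  intro f
  induction f with
  | zero => intro k c _; simp [pvLoopA]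
  | succ f ih =>
      intro k c hall
      simp only [pvLoopA]
      rw [pos_step check idx s k move hmove hn]
      have e1 : idx + s * ((k : Int) + 1) = idx + s * (((k + 1 : Nat)) : Int) := by push_cast; ring
      rw [e1]
      rw [show pvGetB check ((idx + s * (((k + 1 : Nat)) : Int)) % (check.length : Int))
            = pvChk check idx s (k + 1) from rfl]
      have ht : pvChk check idx s (k + 1) = true := hall (k + 1) (by omega) (by omega)
      rw [ht, if_neg (by simp)]
      rw [ih (k + 1) (c + 1) (fun d hd1 hd2 => hall d (by omega) (by omega))]
      simp only [Prod.mk.injEq]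
      constructor
      · congr 1; push_cast; ring
      · push_cast; ring

lemma loopB_skip (check : List Bool) (idx n : Int) :
    ∀ (ds1 ds2 : List Int),
      (∀ d ∈ ds1, pvGetB check (PySem.Int.mod (idx + d) n) = true ∧
                  pvGetB check (PySem.Int.mod (idx - d) n) = true) →
      pvLoopB check idx n (ds1 ++ ds2) = pvLoopB check idx n ds2 := by
  intro ds1
  induction ds1 with
  | nil => intro ds2 _; rfl
  | cons d ds ih =>
      intro ds2 h
      have hd := h d (by simp)
      simp only [List.cons_append, pvLoopB, hd.1, hd.2]
      · exact ih ds2 (fun e he => h e (by simp [he]))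

-- pvMoveLeft/pvMoveRight agree with the modular step on in-range positions
lemma moveL_eq (check : List Bool) (hn : 0 < (check.length : Int)) :
    ∀ t : Int, 0 ≤ t → t < (check.length : Int) →
      pvMoveLeft (check.length : Int) t = (t + (-1)) % (check.length : Int) := by
  intro t ht0 ht1
  unfold pvMoveLeft
  split_ifs with h
  · rw [Int.emod_eq_of_lt (by omega) (by omega)]; omega
  · have ht : t = 0 := by omega
    subst ht
    have e1 : ((check.length : Int) - 1 + (check.length : Int) * (-1)) % (check.length : Int)
        = ((check.length : Int) - 1) % (check.length : Int) := by
      rw [Int.add_mul_emod_self_left]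
    have e2 : ((check.length : Int) - 1 + (check.length : Int) * (-1)) = (0 : Int) + (-1) := by ring
    rw [e2] at e1
    rw [e1, Int.emod_eq_of_lt (by omega) (by omega)]

lemma moveR_eq (check : List Bool) :
    ∀ t : Int, 0 ≤ t → t < (check.length : Int) →
      pvMoveRight (check.length : Int) t = (t + 1) % (check.length : Int) := by
  intro t ht0 ht1
  unfold pvMoveRight
  split_ifs with h
  · rw [Int.emod_eq_of_lt (by omega) (by omega)]
  · have ht : t = (check.length : Int) - 1 := by omega
    subst ht
    have e : ((check.length : Int) - 1 + 1) = (check.length : Int) := by ring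
    rw [e, Int.emod_self]

-- the cell at distance len(check) (in either direction) is idx itself
lemma chk_full (check : List Bool) (idx s : Int) (h0 : 0 ≤ idx) (h1 : idx < (check.length : Int)) :
    pvChk check idx s check.length = pvGetB check idx := by
  unfold pvChk
  rw [mul_comm, Int.add_mul_emod_self_left, Int.emod_eq_of_lt h0 h1]

-- B's two branch conditions are pvChk in the two directions
lemma condR_eq (check : List Bool) (idx : Int) (hn : 0 < (check.length : Int)) :
    ∀ d : Int, 0 ≤ d →
      pvGetB check (PySem.Int.mod (idx + d) (check.length : Int)) = pvChk check idx 1 d.toNat := by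
  intro d hd
  unfold pvChk
  rw [PySem.Int.mod_eq_emod_of_pos hn]
  congr 2
  rw [one_mul, Int.toNat_of_nonneg hd]

lemma condL_eq (check : List Bool) (idx : Int) (hn : 0 < (check.length : Int)) :
    ∀ d : Int, 0 ≤ d →
      pvGetB check (PySem.Int.mod (idx - d) (check.length : Int)) = pvChk check idx (-1) d.toNat := by
  intro d hd
  unfold pvChk
  rw [PySem.Int.mod_eq_emod_of_pos hn]
  congr 2
  rw [neg_one_mul, Int.toNat_of_nonneg hd]
  ring

-- when every cell reads as checked, neither loop ever breaks
lemma loopA_never (check : List Bool) (move : Int → Int)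
    (h : ∀ i : Int, pvGetB check i = true) :
    ∀ (f : Nat) (t c : Int), pvLoopA check move f t c = (Nat.iterate move f t, c + (f : Int)) := by
  intro f
  induction f with
  | zero => intro t c; simp [pvLoopA, Nat.iterate]
  | succ f ih =>
      intro t c
      simp only [pvLoopA, h (move t)]
      rw [if_neg (by simp), ih (move t) (c + 1)]
      simp only [Prod.mk.injEq]
      exact ⟨(Function.iterate_succ_apply move f t).symm, by push_cast; ring⟩

lemma loopB_never (check : List Bool) (idx n : Int)
    (h : ∀ i : Int, pvGetB check i = true) :
    ∀ ds : List Int, pvLoopB check idx n ds = (-1, -1) := by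
  intro ds
  induction ds with
  | nil => rfl
  | cons d ds ih =>
      simp only [pvLoopB, h (PySem.Int.mod (idx + d) n), h (PySem.Int.mod (idx - d) n)]
      rw [if_neg (by simp), if_neg (by simp)]
      exact ih

-- with one element (or none) both sides always answer (-1, -1): A's single iteration makes cnt = len
lemma loopA_fuel_one (check : List Bool) (move : Int → Int) (t c : Int) :
    (pvLoopA check move 1 t c).2 = c + 1 := by
  simp only [pvLoopA]
  split_ifs <;> rfl

lemma pv_main (idx : Int) (check : List Bool) (hpre : Pre_nextIdx idx check) :
    nextIdx idx check = nextIdx_alt idx check := by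
  rcases hpre with hnil | ⟨h0, h1⟩ | ⟨hb1, hb2, hforce⟩
  · -- empty list: both sides are (-1, -1)
    subst hnil
    simp [nextIdx, nextIdx_alt, pvLoopA, pvLoopB, PySem.List.pyRange_one_eq_nil (by omega : (0:Int) ≤ 1)]
  · -- idx is a real index of check
    have hn : 0 < (check.length : Int) := by omega
    have hlen : 0 < check.length := by exact_mod_cast hn
    have hmL := moveL_eq check hn
    have hmR := moveR_eq check
    by_cases hex : ∃ d : Nat, 1 ≤ d ∧ (d : Int) < (check.length : Int) ∧
        (pvChk check idx 1 d = false ∨ pvChk check idx (-1) d = false)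
    · -- some cell other than idx is unchecked; dm = the first distance at which one is found
      set dm := Nat.find hex with hdm_def
      obtain ⟨hdm1, hdm2, hdmor⟩ := Nat.find_spec hex
      rw [← hdm_def] at hdm1 hdm2 hdmor
      have hmin : ∀ j, j < dm → 1 ≤ j →
          pvChk check idx 1 j = true ∧ pvChk check idx (-1) j = true := by
        intro j hj hj1
        have h2 := Nat.find_min hex hj
        have hj2 : (j : Int) < (check.length : Int) := by omega
        simp only [not_and] at h2
        have h3 := h2 hj1 hj2
        simp only [not_or, Bool.not_eq_false] at h3
        exact h3
      -- skip condition for B's loop below dm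
      have hskip : ∀ d ∈ PySem.List.pyRange 1 (dm : Int) 1,
          pvGetB check (PySem.Int.mod (idx + d) (check.length : Int)) = true ∧
          pvGetB check (PySem.Int.mod (idx - d) (check.length : Int)) = true := by
        intro d hd
        rw [PySem.List.mem_pyRange_one] at hd
        have h01 : (1:Int) ≤ d := hd.1
        have hmm := hmin d.toNat (by omega) (by omega)
        rw [condR_eq check idx hn d (by omega), condL_eq check idx hn d (by omega)]
        exact hmm
      have hsplit : PySem.List.pyRange 1 (check.length : Int) 1
          = PySem.List.pyRange 1 (dm : Int) 1 ++ PySem.List.pyRange (dm : Int) (check.length : Int) 1 :=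
        PySem.List.pyRange_one_append 1 (dm : Int) (check.length : Int) (by omega) (by omega)
      have hcons : PySem.List.pyRange (dm : Int) (check.length : Int) 1
          = (dm : Int) :: PySem.List.pyRange ((dm : Int) + 1) (check.length : Int) 1 :=
        PySem.List.pyRange_one_cons (by omega)
      have hBpre : nextIdx_alt idx check
          = pvLoopB check idx (check.length : Int) ((dm : Int) :: PySem.List.pyRange ((dm : Int) + 1) (check.length : Int) 1) := by
        rw [nextIdx_alt, hsplit, loopB_skip check idx (check.length : Int) _ _ hskip, hcons]
      by_cases hR : pvChk check idx 1 dm = false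
      · -- the right scan wins at distance dm
        have hRloop : pvLoopA check (pvMoveRight (check.length : Int)) check.length idx 0
            = ((idx + (dm : Int)) % (check.length : Int), (dm : Int)) := by
          have h := loopA_hit check (pvMoveRight (check.length : Int)) 1 idx hmR hn
            check.length 0 dm 0 (by omega) (by omega)
            (fun d hd1 hd2 => (hmin d hd2 (by omega)).1) hR
          simpa [Int.emod_eq_of_lt h0 h1] using h
        -- the left scan needs at least dm steps, and at most len - dm
        have hq : ∃ d : Nat, 1 ≤ d ∧ d ≤ check.length ∧ pvChk check idx (-1) d = false := by
          refine ⟨check.length - dm, by omega, by omega, ?_⟩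
          unfold pvChk at hR ⊢
          have e : idx + (-1) * ((check.length - dm : Nat) : Int)
              = idx + 1 * (dm : Int) - (check.length : Int) := by push_cast [Nat.cast_sub (by omega : dm ≤ check.length)]; ring
          rw [e, Int.sub_emod_right]
          exact hR
        set dl := Nat.find hq with hdl_def
        obtain ⟨hdl1, hdl2, hdlF⟩ := Nat.find_spec hq
        rw [← hdl_def] at hdl1 hdl2 hdlF
        have hdl_le : dl ≤ check.length - dm := Nat.find_min' hq ⟨by omega, by omega, by
          unfold pvChk at hR ⊢
          have e : idx + (-1) * ((check.length - dm : Nat) : Int)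
              = idx + 1 * (dm : Int) - (check.length : Int) := by push_cast [Nat.cast_sub (by omega : dm ≤ check.length)]; ring
          rw [e, Int.sub_emod_right]
          exact hR⟩
        have hdl_ge : dm ≤ dl := by
          by_contra hlt
          have h2 := (hmin dl (by omega) hdl1).2
          rw [hdlF] at h2
          simp at h2
        have hLloop : pvLoopA check (pvMoveLeft (check.length : Int)) check.length idx 0
            = ((idx - (dl : Int)) % (check.length : Int), (dl : Int)) := by
          have h := loopA_hit check (pvMoveLeft (check.length : Int)) (-1) idx hmL hn
            check.length 0 dl 0 (by omega) (by omega)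
            (fun d hd1 hd2 => by
              have h2 := Nat.find_min hq hd2
              simp only [not_and, Bool.not_eq_false] at h2
              exact h2 (by omega) (by omega)) hdlF
          have e : idx + (-1) * (dl : Int) = idx - (dl : Int) := by ring
          simpa [Int.emod_eq_of_lt h0 h1, e] using h
        rw [hBpre]
        simp only [nextIdx, hRloop, hLloop, pvLoopB]
        rw [condR_eq check idx hn (dm : Int) (by omega)]
        simp only [Int.toNat_natCast, hR]
        have c1 : ¬(((dl : Nat) : Int) = (check.length : Int) ∨ ((dm : Nat) : Int) = (check.length : Int)) := by omega
        have c2 : ((dl : Nat) : Int) ≥ ((dm : Nat) : Int) := by omega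
        rw [if_neg c1, if_pos c2]
        simp [PySem.Int.mod_eq_emod_of_pos hn]
      · -- the right cell at dm is checked, so the left one is unchecked: the left scan wins
        have hL : pvChk check idx (-1) dm = false := by
          rcases hdmor with h | h
          · exact absurd h hR
          · exact h
        have hRtrue : pvChk check idx 1 dm = true := by
          cases hcase : pvChk check idx 1 dm
          · exact absurd hcase hR
          · rfl
        have hLloop : pvLoopA check (pvMoveLeft (check.length : Int)) check.length idx 0
            = ((idx - (dm : Int)) % (check.length : Int), (dm : Int)) := by
          have h := loopA_hit check (pvMoveLeft (check.length : Int)) (-1) idx hmL hn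
            check.length 0 dm 0 (by omega) (by omega)
            (fun d hd1 hd2 => (hmin d hd2 (by omega)).2) hL
          have e : idx + (-1) * (dm : Int) = idx - (dm : Int) := by ring
          simpa [Int.emod_eq_of_lt h0 h1, e] using h
        have hq : ∃ d : Nat, 1 ≤ d ∧ d ≤ check.length ∧ pvChk check idx 1 d = false := by
          refine ⟨check.length - dm, by omega, by omega, ?_⟩
          unfold pvChk at hL ⊢
          have e : idx + 1 * ((check.length - dm : Nat) : Int)
              = idx + (-1) * (dm : Int) + (check.length : Int) * 1 := by push_cast [Nat.cast_sub (by omega : dm ≤ check.length)]; ring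
          rw [e, Int.add_mul_emod_self_left]
          exact hL
        set dr := Nat.find hq with hdr_def
        obtain ⟨hdr1, hdr2, hdrF⟩ := Nat.find_spec hq
        rw [← hdr_def] at hdr1 hdr2 hdrF
        have hdr_le : dr ≤ check.length - dm := Nat.find_min' hq ⟨by omega, by omega, by
          unfold pvChk at hL ⊢
          have e : idx + 1 * ((check.length - dm : Nat) : Int)
              = idx + (-1) * (dm : Int) + (check.length : Int) * 1 := by push_cast [Nat.cast_sub (by omega : dm ≤ check.length)]; ring
          rw [e, Int.add_mul_emod_self_left]
          exact hL⟩
        have hdr_gt : dm < dr := by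
          rcases Nat.lt_or_ge dm dr with h | h
          · exact h
          · exfalso
            rcases Nat.eq_or_lt_of_le h with he | hlt
            · have h2 : pvChk check idx 1 dm = false := by rw [← he]; exact hdrF
              rw [hRtrue] at h2; simp at h2
            · have h2 := (hmin dr hlt hdr1).1
              rw [hdrF] at h2; simp at h2
        have hRloop : pvLoopA check (pvMoveRight (check.length : Int)) check.length idx 0
            = ((idx + (dr : Int)) % (check.length : Int), (dr : Int)) := by
          have h := loopA_hit check (pvMoveRight (check.length : Int)) 1 idx hmR hn
            check.length 0 dr 0 (by omega) (by omega)
            (fun d hd1 hd2 => by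
              have h2 := Nat.find_min hq hd2
              simp only [not_and, Bool.not_eq_false] at h2
              exact h2 (by omega) (by omega)) hdrF
          simpa [Int.emod_eq_of_lt h0 h1] using h
        rw [hBpre]
        simp only [nextIdx, hRloop, hLloop, pvLoopB]
        rw [condR_eq check idx hn (dm : Int) (by omega), condL_eq check idx hn (dm : Int) (by omega)]
        simp only [Int.toNat_natCast, hRtrue, hL]
        have c1 : ¬(((dm : Nat) : Int) = (check.length : Int) ∨ ((dr : Nat) : Int) = (check.length : Int)) := by omega
        have c2 : ¬(((dm : Nat) : Int) ≥ ((dr : Nat) : Int)) := by omega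
        rw [if_neg c1, if_neg c2]
        simp [PySem.Int.mod_eq_emod_of_pos hn]
    · -- every cell other than idx is checked: both sides return (-1, -1)
      have hall : ∀ d : Nat, 1 ≤ d → (d : Int) < (check.length : Int) →
          pvChk check idx 1 d = true ∧ pvChk check idx (-1) d = true := by
        intro d hd1 hd2
        constructor
        · cases hc : pvChk check idx 1 d
          · exact absurd ⟨d, hd1, hd2, Or.inl hc⟩ hex
          · rfl
        · cases hc : pvChk check idx (-1) d
          · exact absurd ⟨d, hd1, hd2, Or.inr hc⟩ hex
          · rfl
      have hL2 : (pvLoopA check (pvMoveLeft (check.length : Int)) check.length idx 0).2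
          = (check.length : Int) := by
        by_cases hidxc : pvGetB check idx = false
        · have h := loopA_hit check (pvMoveLeft (check.length : Int)) (-1) idx hmL hn
            check.length 0 check.length 0 (by omega) (by omega)
            (fun d hd1 hd2 => (hall d (by omega) (by omega)).2)
            (by rw [chk_full check idx (-1) h0 h1]; exact hidxc)
          simp only [Nat.cast_zero, mul_zero, add_zero, Int.emod_eq_of_lt h0 h1] at h
          rw [h]; ring_nf
        · have h := loopA_all check (pvMoveLeft (check.length : Int)) (-1) idx hmL hn
            check.length 0 0
            (fun d hd1 hd2 => by
              rcases Nat.lt_or_ge d check.length with hc | hc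
              · exact (hall d (by omega) (by omega)).2
              · have hd : d = check.length := by omega
                subst hd
                rw [chk_full check idx (-1) h0 h1]
                cases hcase : pvGetB check idx
                · exact absurd hcase hidxc
                · rfl)
          simp only [Nat.cast_zero, mul_zero, add_zero, Int.emod_eq_of_lt h0 h1] at h
          rw [h]; ring_nf
      have hB : nextIdx_alt idx check = (-1, -1) := by
        rw [nextIdx_alt, show PySem.List.pyRange 1 (check.length : Int) 1
            = PySem.List.pyRange 1 (check.length : Int) 1 ++ [] from (List.append_nil _).symm]
        rw [loopB_skip check idx (check.length : Int) _ _ ?_]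
        · rfl
        · intro d hd
          rw [PySem.List.mem_pyRange_one] at hd
          have h01 : (1:Int) ≤ d := hd.1
          have hmm := hall d.toNat (by omega) (by omega)
          rw [condR_eq check idx hn d (by omega), condL_eq check idx hn d (by omega)]
          exact hmm
      rw [hB]
      simp only [nextIdx]
      rw [if_pos (Or.inl hL2)]
  · -- the forced answers: a one-element list, or no unchecked cell at all
    rcases hforce with hlen1 | hnof
    · match check, hlen1 with
      | [b], _ =>
          have hA : nextIdx idx [b] = (-1, -1) := by
            simp only [nextIdx]
            rw [if_pos (Or.inl (by simpa using loopA_fuel_one [b] (pvMoveLeft 1) idx 0))]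
          have hB : nextIdx_alt idx [b] = (-1, -1) := by
            simp [nextIdx_alt, pvLoopB, PySem.List.pyRange_one_eq_nil (by omega : (1:Int) ≤ 1)]
          rw [hA, hB]
    · -- false ∉ check: neither scan ever breaks, both sides answer (-1, -1) for any idx
      have hget : ∀ i : Int, pvGetB check i = true := by
        intro i
        unfold pvGetB
        cases hg : PySem.List.pyGet? check i with
        | none => rfl
        | some b =>
            cases b
            · exact absurd (PySem.List.mem_of_pyGet?_eq_some check hg) hnof
            · rfl
      have hA : nextIdx idx check = (-1, -1) := by
        simp only [nextIdx]
        rw [if_pos (Or.inl (by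
          rw [loopA_never check (pvMoveLeft (check.length : Int)) hget check.length idx 0]
          simp))]
      have hB : nextIdx_alt idx check = (-1, -1) := by
        rw [nextIdx_alt, loopB_never check idx (check.length : Int) hget]
      rw [hA, hB]

-- ===== VERDICT (by name: the statement is the Claim_ definition above) =====
theorem nextIdx_spec : Claim_equal_nextIdx := by
  intro idx check _ hpre
  unfold Spec_nextIdx
  exact pv_main idx check hpre
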